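-- pv_equiv track=rewrite | github.com/0hhanum/algorithm_study | ICT_test_2/5.py | textQueries
-- ===== SOURCE A (Python) =====
-- from collections import defaultdict
--
-- def textQueries(sentences, queries):
--     # Write your code here
--     answer = [[-1] for _ in queries]
--     table = defaultdict(set)
--     for idx, sentence in enumerate(sentences):
--         for word in sentence.split(" "):
--             table[word].add(idx)
--
--     for q_idx, query in enumerate(queries):
--         tmp = set()
--         for i, word in enumerate(query.split(" ")):
--             if i == 0:
--                 tmp = table[word]
--             else:
--                 tmp = tmp & table[word]
--             if not tmp:
--                 break
--         if tmp:
--             answer[q_idx] = sorted(list(tmp))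
--
--     return answer
-- ===== SOURCE B (Python) =====
-- def textQueries(sentences, queries):
--     # Per-query scan with precomputed per-sentence word sets, instead of an inverted index + set intersections.
--     sentence_word_sets = [set(s.split(" ")) for s in sentences]
--     result = []
--     for query in queries:
--         qwords = query.split(" ")
--         matches = [i for i, sw in enumerate(sentence_word_sets)
--                    if all(w in sw for w in qwords)]
--         result.append(matches if matches else [-1])
--     return result
-- ===== Notes on version B (the rewrite author's own statement) =====
-- stated objective: alternative
-- what changed: Replaces the inverted word->sentence-index index and per-query set intersections (plus a final sort) with a direct per-query scan over precomputed per-sentence word sets, collecting matching indices already in order.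
import Mathlib
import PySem

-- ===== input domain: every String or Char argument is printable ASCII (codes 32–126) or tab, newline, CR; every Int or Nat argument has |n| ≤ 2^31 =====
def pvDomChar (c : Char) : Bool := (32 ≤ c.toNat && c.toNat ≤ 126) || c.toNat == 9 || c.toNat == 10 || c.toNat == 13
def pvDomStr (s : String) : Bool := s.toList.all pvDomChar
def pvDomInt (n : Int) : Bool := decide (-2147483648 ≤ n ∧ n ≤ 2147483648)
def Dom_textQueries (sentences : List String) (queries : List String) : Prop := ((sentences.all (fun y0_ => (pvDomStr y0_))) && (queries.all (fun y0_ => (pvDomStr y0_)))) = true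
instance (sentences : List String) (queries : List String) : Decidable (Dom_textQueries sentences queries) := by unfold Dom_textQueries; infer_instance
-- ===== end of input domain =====

-- B replaces A's inverted index + set intersections + sort by a per-query scan over
-- precomputed per-sentence word sets, collecting matching indices already in order
-- (alternative decomposition, not claimed faster).


-- ===== PORT A =====
-- the query loop: 'tmp = table[word]' on i == 0, 'tmp = tmp & table[word]' otherwise, break when empty
def tqLoopA (table : PySem.Dict String (PySem.Set Int)) : List (Int × String) → PySem.Set Int → PySem.Set Int
  | [], tmp => tmp
  | (i, w) :: rest, tmp =>
    let tmp' := if i == 0 then table.getD w PySem.Set.empty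
                else tmp.inter (table.getD w PySem.Set.empty)
    if tmp'.isEmpty then tmp' else tqLoopA table rest tmp'

-- 'table[word]' on a defaultdict inserts an empty set for a missing key; that mutation never
-- changes the VALUE of any later lookup, so lookups are ported as getD with the empty set.
-- 'answer[q_idx] = …' into the prebuilt [[-1], …] list is realised as the map over queries.
def textQueries (sentences : List String) (queries : List String) : List (List Int) :=
  let table : PySem.Dict String (PySem.Set Int) :=
    (PySem.List.enumerate sentences).foldl
      (fun d p => ((PySem.Str.split? p.2 " ").getD []).foldl
        (fun d w => d.modify w PySem.Set.empty (fun s => s.add p.1)) d)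
      PySem.Dict.empty
  queries.map (fun query =>
    let tmp := tqLoopA table (PySem.List.enumerate ((PySem.Str.split? query " ").getD [])) PySem.Set.empty
    if tmp.isEmpty then [-1] else PySem.List.sorted tmp (fun x => x))

-- ===== PORT B =====
def textQueries_alt (sentences : List String) (queries : List String) : List (List Int) :=
  let sws := sentences.map (fun s => PySem.Set.ofList ((PySem.Str.split? s " ").getD []))
  queries.map (fun query =>
    let qwords := (PySem.Str.split? query " ").getD []
    let hits := ((PySem.List.enumerate sws).filter
        (fun p => qwords.all (fun w => p.2.contains w))).map (fun p => p.1)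
    if hits.isEmpty then [-1] else hits)

-- ===== PRECONDITION & SPEC =====
def Spec_textQueries (sentences : List String) (queries : List String) (out : List (List Int)) : Prop := out = textQueries_alt sentences queries
instance (sentences : List String) (queries : List String) (out : List (List Int)) : Decidable (Spec_textQueries sentences queries out) := by unfold Spec_textQueries; infer_instance

-- ===== CLAIM (what is proved, stated in full; the proofs are below) =====
def Claim_equal_textQueries : Prop := ∀ (sentences : List String) (queries : List String), Dom_textQueries sentences queries → Spec_textQueries sentences queries (textQueries sentences queries)

-- ===== LEMMAS AND PROOFS =====

def tqWords (s : String) : List String := (PySem.Str.split? s " ").getD []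
theorem tqSplitGo_ne_nil (sep : List Char) :
    ∀ (fuel : Nat) (l cur : List Char) (acc : List (List Char)),
      PySem.Chars.splitOn.go sep fuel l cur acc ≠ [] := by
  intro fuel
  induction fuel with
  | zero => intro l cur acc; simp [PySem.Chars.splitOn.go]
  | succ n ih =>
    intro l cur acc
    cases l with
    | nil => simp [PySem.Chars.splitOn.go]
    | cons c rest =>
      rw [PySem.Chars.splitOn.go]
      split
      · exact ih _ _ _
      · exact ih _ _ _

theorem tqWords_ne_nil (s : String) : tqWords s ≠ [] := by
  simp [tqWords, PySem.Str.split?, PySem.Chars.split?, PySem.Chars.splitOn]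
  exact tqSplitGo_ne_nil _ _ _ _ _

def tqTable (sentences : List String) : PySem.Dict String (PySem.Set Int) :=
  (PySem.List.enumerate sentences).foldl
    (fun d p => (tqWords p.2).foldl
      (fun d w => d.modify w PySem.Set.empty (fun s => s.add p.1)) d)
    PySem.Dict.empty
theorem tqTable_inner (i : Int) (w : String) :
    ∀ (ws : List String) (d : PySem.Dict String (PySem.Set Int)),
      (ws.foldl (fun d w' => d.modify w' PySem.Set.empty (fun s => s.add i)) d).getD w PySem.Set.empty
        = if ws.contains w then (d.getD w PySem.Set.empty).add i else d.getD w PySem.Set.empty := by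
  intro ws
  induction ws with
  | nil => intro d; simp
  | cons w' rest ih =>
    intro d
    simp only [List.foldl_cons, ih]
    by_cases hw : w = w'
    · subst hw
      simp [PySem.Dict.getD_modify_self]
    · simp [PySem.Dict.getD_modify_of_ne _ _ _ hw, hw]

theorem tqTable_outer (w : String) :
    ∀ (l : List (Int × String)) (d : PySem.Dict String (PySem.Set Int)),
      (l.foldl (fun d p => (tqWords p.2).foldl
          (fun d w' => d.modify w' PySem.Set.empty (fun s => s.add p.1)) d) d).getD w PySem.Set.empty
        = ((l.filter (fun p => (tqWords p.2).contains w)).map (fun p => p.1)).foldl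
            PySem.Set.add (d.getD w PySem.Set.empty) := by
  intro l
  induction l with
  | nil => intro d; simp
  | cons p rest ih =>
    intro d
    simp only [List.foldl_cons, ih, tqTable_inner]
    by_cases hc : w ∈ tqWords p.2
    · simp [hc]
    · simp [hc]

theorem tqTable_getD (sentences : List String) (w : String) :
    (tqTable sentences).getD w PySem.Set.empty
      = PySem.Set.ofList (((PySem.List.enumerate sentences).filter
          (fun p => (tqWords p.2).contains w)).map (fun p => p.1)) := by
  rw [tqTable, tqTable_outer]
  rw [PySem.Set.ofList_eq_foldl]
  rfl

theorem tqMem_getD (sentences : List String) (w : String) (x : Int) :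
    x ∈ (tqTable sentences).getD w PySem.Set.empty
      ↔ ∃ k : Nat, ∃ h : k < sentences.length, x = (k : Int) ∧ w ∈ tqWords sentences[k] := by
  rw [tqTable_getD]
  rw [PySem.Set.mem_ofList]
  simp only [List.mem_map, List.mem_filter, PySem.List.mem_enumerate_iff]
  constructor
  · rintro ⟨p, ⟨⟨k, hk, rfl⟩, hw⟩, rfl⟩
    exact ⟨k, hk, by simp, by simpa using hw⟩
  · rintro ⟨k, hk, rfl, hw⟩
    exact ⟨((k : Int), sentences[k]), ⟨⟨k, hk, by simp⟩, by simpa using hw⟩, rfl⟩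

theorem tqFoldl_inter_nil (table : PySem.Dict String (PySem.Set Int)) (ws : List String) :
    ws.foldl (fun t w => PySem.Set.inter t (table.getD w PySem.Set.empty)) ([] : PySem.Set Int) = [] := by
  induction ws with
  | nil => rfl
  | cons w rest ih => simpa [PySem.Set.inter] using ih

theorem tqMem_foldl_inter (table : PySem.Dict String (PySem.Set Int)) :
    ∀ (ws : List String) (t : PySem.Set Int) (x : Int),
      x ∈ ws.foldl (fun t w => PySem.Set.inter t (table.getD w PySem.Set.empty)) t
        ↔ x ∈ t ∧ ∀ w ∈ ws, x ∈ table.getD w PySem.Set.empty := by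
  intro ws
  induction ws with
  | nil => intro t x; simp
  | cons w rest ih =>
    intro t x
    simp only [List.foldl_cons, ih, PySem.Set.mem_inter, List.mem_cons]
    constructor
    · rintro ⟨⟨ht, hw⟩, hrest⟩
      exact ⟨ht, fun w' hw' => hw'.elim (fun h => h ▸ hw) (hrest w')⟩
    · rintro ⟨ht, hall⟩
      exact ⟨⟨ht, hall w (Or.inl rfl)⟩, fun w' hw' => hall w' (Or.inr hw')⟩

theorem tqFoldl_inter_sublist (table : PySem.Dict String (PySem.Set Int)) :
    ∀ (ws : List String) (t : PySem.Set Int),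
      (ws.foldl (fun t w => PySem.Set.inter t (table.getD w PySem.Set.empty)) t).Sublist t := by
  intro ws
  induction ws with
  | nil => intro t; exact List.Sublist.refl t
  | cons w rest ih =>
    intro t
    exact (ih _).trans List.filter_sublist

theorem tqLoopA_eq_foldl (table : PySem.Dict String (PySem.Set Int)) :
    ∀ (ws : List String) (k : Int) (tmp : PySem.Set Int), 1 ≤ k →
      tqLoopA table (PySem.List.enumerate ws k) tmp
        = ws.foldl (fun t w => PySem.Set.inter t (table.getD w PySem.Set.empty)) tmp := by
  intro ws
  induction ws with
  | nil => intro k tmp hk; rfl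
  | cons w rest ih =>
    intro k tmp hk
    rw [PySem.List.enumerate_cons]
    have hk0 : (k == 0) = false := by simp; omega
    simp only [tqLoopA, hk0, if_false, Bool.false_eq_true]
    by_cases he : (tmp.inter (table.getD w PySem.Set.empty)).isEmpty
    · rw [if_pos he]
      rw [List.isEmpty_iff] at he
      simp only [List.foldl_cons, he, tqFoldl_inter_nil]
    · rw [if_neg he, ih _ _ (by omega), List.foldl_cons]

def tqMatches (sentences : List String) (qwords : List String) : List Int :=
  ((PySem.List.enumerate (sentences.map (fun s => PySem.Set.ofList (tqWords s)))).filter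
      (fun p => qwords.all (fun w => p.2.contains w))).map (fun p => p.1)

theorem tqMem_matches (sentences : List String) (qwords : List String) (x : Int) :
    x ∈ tqMatches sentences qwords
      ↔ ∃ k : Nat, ∃ h : k < sentences.length, x = (k : Int) ∧ ∀ w ∈ qwords, w ∈ tqWords sentences[k] := by
  unfold tqMatches
  simp only [List.mem_map, List.mem_filter, PySem.List.mem_enumerate_iff, List.all_eq_true]
  constructor
  · rintro ⟨p, ⟨⟨k, hk, rfl⟩, hall⟩, rfl⟩
    rw [List.length_map] at hk
    refine ⟨k, hk, by simp, fun w hw => ?_⟩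
    have := hall w hw
    simp only [List.getElem_map] at this
    simpa [PySem.Set.contains, PySem.Set.mem_ofList] using this
  · rintro ⟨k, hk, rfl, hall⟩
    refine ⟨((k : Int), PySem.Set.ofList (tqWords sentences[k])), ⟨⟨k, by simpa using hk, by simp⟩, ?_⟩, rfl⟩
    intro w hw
    simpa [PySem.Set.contains, PySem.Set.mem_ofList] using hall w hw

theorem tqMatches_pairwise (sentences : List String) (qwords : List String) :
    (tqMatches sentences qwords).Pairwise (· < ·) := by
  unfold tqMatches
  exact ((PySem.List.pairwise_lt_enumerate _ _).filter _).map _ (fun a b h => h)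

theorem tqPerQuery (sentences : List String) (query : String) :
    (let tmp := tqLoopA (tqTable sentences)
        (PySem.List.enumerate (tqWords query)) PySem.Set.empty
     if tmp.isEmpty then [-1] else PySem.List.sorted tmp (fun x => x))
    = (if (tqMatches sentences (tqWords query)).isEmpty then [-1]
       else tqMatches sentences (tqWords query)) := by
  obtain ⟨w0, ws, h⟩ : ∃ w0 ws, tqWords query = w0 :: ws := by
    cases hq : tqWords query with
    | nil => exact absurd hq (tqWords_ne_nil query)
    | cons a b => exact ⟨a, b, rfl⟩
  have htmp : tqLoopA (tqTable sentences) (PySem.List.enumerate (tqWords query)) PySem.Set.empty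
      = ws.foldl (fun t w => PySem.Set.inter t ((tqTable sentences).getD w PySem.Set.empty))
          ((tqTable sentences).getD w0 PySem.Set.empty) := by
    rw [h, PySem.List.enumerate_cons]
    simp only [tqLoopA, beq_self_eq_true, if_true, zero_add]
    by_cases he : ((tqTable sentences).getD w0 PySem.Set.empty).isEmpty
    · rw [if_pos he]
      rw [List.isEmpty_iff] at he
      rw [he, tqFoldl_inter_nil]
    · rw [if_neg he, tqLoopA_eq_foldl _ _ 1 _ (le_refl 1)]
  set T := ws.foldl (fun t w => PySem.Set.inter t ((tqTable sentences).getD w PySem.Set.empty))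
      ((tqTable sentences).getD w0 PySem.Set.empty) with hT
  set M := tqMatches sentences (tqWords query) with hM
  have hmem : ∀ x, x ∈ T ↔ x ∈ M := by
    intro x
    rw [hT, hM, tqMem_foldl_inter, tqMem_matches, h]
    constructor
    · rintro ⟨h0, hrest⟩
      obtain ⟨k, hk, rfl, hw0⟩ := (tqMem_getD sentences w0 _).1 h0
      refine ⟨k, hk, rfl, fun w hw => ?_⟩
      rcases List.mem_cons.1 hw with rfl | hw'
      · exact hw0
      · obtain ⟨k', hk', hkk, hwk⟩ := (tqMem_getD sentences w _).1 (hrest w hw')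
        have : k' = k := by exact_mod_cast hkk.symm
        subst this
        exact hwk
    · rintro ⟨k, hk, rfl, hall⟩
      exact ⟨(tqMem_getD sentences w0 _).2 ⟨k, hk, rfl, hall w0 List.mem_cons_self⟩,
        fun w hw => (tqMem_getD sentences w _).2 ⟨k, hk, rfl, hall w (List.mem_cons_of_mem _ hw)⟩⟩
  have nodupT : T.Nodup := by
    have h0 : ((tqTable sentences).getD w0 PySem.Set.empty).Nodup := by
      rw [tqTable_getD]
      exact PySem.Set.nodup_ofList _
    exact (tqFoldl_inter_sublist _ ws _).nodup h0
  have pairM : M.Pairwise (· < ·) := tqMatches_pairwise sentences _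
  have nodupM : M.Nodup := pairM.imp ne_of_lt
  have perm : M.Perm T := by
    rw [List.perm_ext_iff_of_nodup nodupM nodupT]
    exact fun x => (hmem x).symm
  have hsorted : PySem.List.sorted T (fun x => x) = M :=
    PySem.List.sorted_eq_of_perm_of_pairwise_lt T M (fun x => x) perm pairM
  have hempty : T.isEmpty = M.isEmpty := by
    rcases hMe : M.isEmpty with hf | ht
    · rw [List.isEmpty_eq_false_iff_exists_mem] at hMe
      obtain ⟨x, hx⟩ := hMe
      rw [List.isEmpty_eq_false_iff_exists_mem]
      exact ⟨x, (hmem x).2 hx⟩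
    · rw [List.isEmpty_iff] at hMe
      rw [List.isEmpty_iff, List.eq_nil_iff_forall_not_mem]
      intro x hx
      exact (List.eq_nil_iff_forall_not_mem.1 hMe x) ((hmem x).1 hx)
  simp only [htmp]
  rw [hempty, hsorted]

-- ===== VERDICT (by name: the statement is the Claim_ definition above) =====
theorem textQueries_spec : Claim_equal_textQueries := by
  intro sentences queries _
  unfold Spec_textQueries textQueries textQueries_alt
  exact List.map_congr_left (fun q _ => tqPerQuery sentences q)
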